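-- pv_equiv track=rewrite | github.com/YR-U65/ppp_2025 | ppp2025_task10_file3/weather_select.py | get_rain_events
-- ===== SOURCE A (Python) =====
-- def get_rain_events(rainfalls):
--     count = 0
--     count_list = []
--     for rain in rainfalls:
--         if rain > 0:
--             count += 1
--         else :
--             if count > 0:
--                 count_list.append(count)
--                 count = 0
--     if count > 0 :
--         count_list.append(count)
--     return count_list
-- ===== SOURCE B (Python) =====
-- def get_rain_events(rainfalls):
--     # Two-pointer run scan: jump over each maximal positive run and record its length.
--     events = []
--     i = 0
--     n = len(rainfalls)
--     while i < n:
--         if rainfalls[i] > 0: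
--             j = i
--             while j < n and rainfalls[j] > 0:
--                 j += 1
--             events.append(j - i)
--             i = j
--         else:
--             i += 1
--     return events
-- ===== Notes on version B (the rewrite author's own statement) =====
-- stated objective: alternative
-- what changed: Replaces A's running counter with post-loop flush by a two-pointer scan that jumps over each maximal positive run and records its length directly; no pending state or final flush.
import Mathlib
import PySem

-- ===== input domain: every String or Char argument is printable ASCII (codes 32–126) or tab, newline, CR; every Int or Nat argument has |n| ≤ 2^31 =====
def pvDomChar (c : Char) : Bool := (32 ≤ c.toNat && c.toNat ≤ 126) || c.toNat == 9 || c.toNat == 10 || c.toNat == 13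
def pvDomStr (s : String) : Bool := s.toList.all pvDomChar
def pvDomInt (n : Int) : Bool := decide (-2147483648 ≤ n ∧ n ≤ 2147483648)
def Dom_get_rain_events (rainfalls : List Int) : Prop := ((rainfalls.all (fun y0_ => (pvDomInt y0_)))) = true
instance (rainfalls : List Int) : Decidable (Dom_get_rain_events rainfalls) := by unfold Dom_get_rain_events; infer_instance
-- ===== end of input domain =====

-- B replaces A's running counter + post-loop flush by a run-jumping scan (takeWhile/dropWhile over maximal positive runs); alternative decomposition, same cost.


-- ===== PORT A =====
-- literal port of A: fold over the list carrying (count, count_list), final flush of a pending count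
def stepA (s : Int × List Int) (rain : Int) : Int × List Int :=
  if rain > 0 then (s.1 + 1, s.2)
  else if s.1 > 0 then (0, s.2 ++ [s.1]) else s

def get_rain_events (rainfalls : List Int) : List Int :=
  let s := rainfalls.foldl stepA (0, [])
  if s.1 > 0 then s.2 ++ [s.1] else s.2

-- ===== PORT B =====
-- port of B: jump over each maximal positive run (inner while = takeWhile extent), record its length
def get_rain_events_alt : List Int → List Int
  | [] => []
  | r :: rs =>
    if r > 0 then
      (((r :: rs).takeWhile (fun x => decide (0 < x))).length : Int)
        :: get_rain_events_alt ((r :: rs).dropWhile (fun x => decide (0 < x)))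
    else
      get_rain_events_alt rs
termination_by l => l.length
decreasing_by
  · simp_all
    exact List.length_dropWhile_le _ _
  · simp


-- ===== PRECONDITION & SPEC =====
def Spec_get_rain_events (rainfalls : List Int) (out : List Int) : Prop := out = get_rain_events_alt rainfalls
instance (rainfalls : List Int) (out : List Int) : Decidable (Spec_get_rain_events rainfalls out) := by unfold Spec_get_rain_events; infer_instance

-- ===== CLAIM (what is proved, stated in full; the proofs are below) =====
def Claim_equal_get_rain_events : Prop := ∀ (rainfalls : List Int), Dom_get_rain_events rainfalls → Spec_get_rain_events rainfalls (get_rain_events rainfalls)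

-- ===== LEMMAS AND PROOFS =====

-- A's loop written as plain structural recursion (proof helper only)
def pend (c : Int) : List Int → List Int
  | [] => if c > 0 then [c] else []
  | r :: rs => if r > 0 then pend (c + 1) rs else if c > 0 then c :: pend 0 rs else pend c rs

def flushA (s : Int × List Int) : List Int := if s.1 > 0 then s.2 ++ [s.1] else s.2

theorem foldl_eq_pend (l : List Int) (c : Int) (acc : List Int) :
    flushA (l.foldl stepA (c, acc)) = acc ++ pend c l := by
  induction l generalizing c acc with
  | nil => simp only [List.foldl_nil, flushA, pend]; split_ifs <;> simp
  | cons r rs ih =>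
    simp only [List.foldl_cons, pend]
    by_cases h1 : r > 0
    · rw [show stepA (c, acc) r = (c + 1, acc) by simp [stepA, h1], if_pos h1, ih]
    · by_cases h2 : c > 0
      · rw [show stepA (c, acc) r = (0, acc ++ [c]) by simp [stepA, h1, h2],
          if_neg h1, if_pos h2, ih]
        simp
      · rw [show stepA (c, acc) r = (c, acc) by simp [stepA, h1, h2],
          if_neg h1, if_neg h2, ih]

theorem pend_pos (l : List Int) (c : Int) (hc : 0 < c) :
    pend c l = (c + ((l.takeWhile (fun x => decide (0 < x))).length : Int))
      :: pend 0 (l.dropWhile (fun x => decide (0 < x))) := by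
  induction l generalizing c with
  | nil => simp [pend, hc]
  | cons r rs ih =>
    by_cases h : 0 < r
    · simp only [pend, if_pos h, List.takeWhile_cons, List.dropWhile_cons, decide_eq_true h,
        if_true, List.length_cons]
      rw [ih (c + 1) (by omega)]
      congr 1
      push_cast
      ring
    · have h' : ¬ r > 0 := h
      simp [pend, h', hc]

theorem pend_zero_eq_alt (l : List Int) : pend 0 l = get_rain_events_alt l := by
  fun_induction get_rain_events_alt l with
  | case1 => simp [pend]
  | case2 r rs h ih =>
    have hd : (r :: rs).dropWhile (fun x => decide (0 < x)) =
        rs.dropWhile (fun x => decide (0 < x)) := by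
      simp [h]
    rw [hd] at ih
    simp only [pend, if_pos h]
    rw [show (0 : Int) + 1 = 1 by decide, pend_pos rs 1 (by omega)]
    simp [h, hd, ih]
    ring
  | case3 r rs h ih =>
    simp [pend, h, ih]

-- ===== VERDICT (by name: the statement is the Claim_ definition above) =====
theorem get_rain_events_spec : Claim_equal_get_rain_events := by
  intro rainfalls _
  have h := foldl_eq_pend rainfalls 0 []
  rw [pend_zero_eq_alt] at h
  simpa [Spec_get_rain_events, get_rain_events, flushA] using h
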